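-- pv_equiv track=rewrite | github.com/dudgns5845/AlgorithmStudy | COSPro1/도서 대여점 운영/sol_py.py | solution
-- ===== SOURCE A (Python) =====
-- class ComicBook():
-- 	def get_rental_price(self,day):
-- 		cost = 500
-- 		day -= 2
-- 		if day > 0:
-- 			cost += 200*day
-- 		return cost
--
-- class Novel():
-- 	def get_rental_price(self,day):
-- 		cost = 1000
-- 		day -= 3
-- 		if day > 0:
-- 			cost += 300*day
-- 		return cost
--
-- def solution(book_types, day):
-- 	books = []
-- 	for types in book_types:
-- 		if types == "comic":
-- 			books.append(ComicBook())
-- 		elif types == "novel":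
-- 			books.append(Novel())
-- 	total_price = 0
-- 	for book in books:
-- 		total_price += book.get_rental_price(day)
-- 	return total_price
-- ===== SOURCE B (Python) =====
-- def solution(book_types, day):
--     comic_price = 500 + (200 * (day - 2) if day > 2 else 0)
--     novel_price = 1000 + (300 * (day - 3) if day > 3 else 0)
--     return book_types.count("comic") * comic_price + book_types.count("novel") * novel_price
-- ===== Notes on version B (the rewrite author's own statement) =====
-- stated objective: simpler
-- what changed: Instead of building a list of book objects and summing per-object rental prices, B counts 'comic'/'novel' occurrences and multiplies each count by a per-type price computed once in closed form.
import Mathlib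
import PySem

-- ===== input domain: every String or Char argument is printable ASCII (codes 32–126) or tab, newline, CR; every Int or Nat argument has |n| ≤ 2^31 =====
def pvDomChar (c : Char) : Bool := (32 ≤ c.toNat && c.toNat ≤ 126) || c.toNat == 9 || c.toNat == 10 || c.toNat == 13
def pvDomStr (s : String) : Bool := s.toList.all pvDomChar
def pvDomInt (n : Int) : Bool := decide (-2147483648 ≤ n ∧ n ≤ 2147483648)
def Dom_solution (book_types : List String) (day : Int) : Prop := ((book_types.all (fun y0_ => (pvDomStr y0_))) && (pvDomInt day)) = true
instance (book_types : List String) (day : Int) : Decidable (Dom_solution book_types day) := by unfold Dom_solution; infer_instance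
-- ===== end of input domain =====

-- B builds no book objects: it counts 'comic'/'novel' and multiplies each count by a per-type price computed once.

-- ===== PORT A =====
inductive PvBook
  | comic
  | novel
deriving DecidableEq, Repr

-- ComicBook.get_rental_price / Novel.get_rental_price, transliterated
def pvGetRentalPrice (b : PvBook) (day : Int) : Int :=
  match b with
  | .comic =>
      let cost : Int := 500
      let day := day - 2
      if day > 0 then cost + 200 * day else cost
  | .novel =>
      let cost : Int := 1000
      let day := day - 3
      if day > 0 then cost + 300 * day else cost

def solution (book_types : List String) (day : Int) : Int :=
  let books : List PvBook :=
    book_types.foldl (fun books types =>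
      if types = "comic" then books ++ [PvBook.comic]
      else if types = "novel" then books ++ [PvBook.novel]
      else books) []
  books.foldl (fun total_price book => total_price + pvGetRentalPrice book day) 0

-- ===== PORT B =====
def solution_alt (book_types : List String) (day : Int) : Int :=
  let comic_price : Int := 500 + (if day > 2 then 200 * (day - 2) else 0)
  let novel_price : Int := 1000 + (if day > 3 then 300 * (day - 3) else 0)
  (PySem.List.count book_types "comic") * comic_price
    + (PySem.List.count book_types "novel") * novel_price

-- ===== PRECONDITION & SPEC =====
def Spec_solution (book_types : List String) (day : Int) (out : Int) : Prop := out = solution_alt book_types day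
instance (book_types : List String) (day : Int) (out : Int) : Decidable (Spec_solution book_types day out) := by unfold Spec_solution; infer_instance

-- ===== CLAIM (what is proved, stated in full; the proofs are below) =====
def Claim_equal_solution : Prop := ∀ (book_types : List String) (day : Int), Dom_solution book_types day → Spec_solution book_types day (solution book_types day)

-- ===== LEMMAS AND PROOFS =====

theorem pv_sum_foldl (books : List PvBook) (day acc : Int) :
    books.foldl (fun total_price book => total_price + pvGetRentalPrice book day) acc
      = acc + (books.count PvBook.comic : Int) * pvGetRentalPrice .comic day
            + (books.count PvBook.novel : Int) * pvGetRentalPrice .novel day := by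
  induction books generalizing acc with
  | nil => simp
  | cons b bs ih =>
    cases b <;> simp [List.foldl, ih, List.count_cons] <;> push_cast <;> ring

theorem pv_books_count (book_types : List String) (init : List PvBook) :
    let books := book_types.foldl (fun books types =>
      if types = "comic" then books ++ [PvBook.comic]
      else if types = "novel" then books ++ [PvBook.novel]
      else books) init
    books.count PvBook.comic = init.count PvBook.comic + book_types.count "comic"
      ∧ books.count PvBook.novel = init.count PvBook.novel + book_types.count "novel" := by
  induction book_types generalizing init with
  | nil => simp
  | cons t ts ih =>
    simp only [List.foldl]
    by_cases h1 : t = "comic"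
    · obtain ⟨c, n⟩ := ih (init ++ [PvBook.comic])
      simp only [List.count_append, List.count_cons, List.count_nil] at c n
      simp [h1, List.count_cons] at c n ⊢
      omega
    · by_cases h2 : t = "novel"
      · obtain ⟨c, n⟩ := ih (init ++ [PvBook.novel])
        simp only [List.count_append, List.count_cons, List.count_nil] at c n
        simp [h1, h2, List.count_cons] at c n ⊢
        omega
      · obtain ⟨c, n⟩ := ih init
        simp [h1, h2, c, n]

theorem pv_price_comic (day : Int) :
    pvGetRentalPrice .comic day = 500 + (if day > 2 then 200 * (day - 2) else 0) := by
  simp only [pvGetRentalPrice]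
  split_ifs with h1 h2 h2 <;> omega

theorem pv_price_novel (day : Int) :
    pvGetRentalPrice .novel day = 1000 + (if day > 3 then 300 * (day - 3) else 0) := by
  simp only [pvGetRentalPrice]
  split_ifs with h1 h2 h2 <;> omega

-- ===== VERDICT (by name: the statement is the Claim_ definition above) =====
theorem solution_spec : Claim_equal_solution := by
  intro book_types day _
  show solution book_types day = solution_alt book_types day
  unfold solution solution_alt
  obtain ⟨hc, hn⟩ := pv_books_count book_types []
  simp only [] at hc hn ⊢
  rw [pv_sum_foldl, hc, hn, pv_price_comic, pv_price_novel]
  simp [PySem.List.count]
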